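-- pv_equiv track=rewrite | github.com/asgunzi/CifraPoli | Polialfa01.py | decifrarPoli
-- ===== SOURCE A (Python) =====
-- from math import ceil
--
-- def decifrarPoli(mensagem, tamBloco, chaves):
--     #Mensagem a ser cifrada
--     #Tamanho do bloco (int)
--     #Chaves como uma lista de inteiros
--
--     #Transforma tudo em minúsculo
--     msg2 = mensagem.lower()
--
--
--     #Divide a mensagem em blocos
--     nblocos = ceil(len(mensagem)/tamBloco)
--     nchaves = len(chaves)
--
--     msgOut =""
--
--     for i in range(nblocos):
--         ini = i*tamBloco
--         fim = (i+1)*tamBloco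
--         msg1  = msg2[ini:fim]
--
--         idx_chv = i % nchaves
--         chv = chaves[idx_chv]
--
--         msgOut += decifrarCesar(msg1, chv)
--
--
--     return(msgOut)
--
-- def decifrarCesar(mensagem, chave):
--
--     alfabeto = ['a', 'b', 'c', 'd', 'e', 'f', 'g', 'h', 'i', 'j','k','l','m','n','o','p','q','r','s','t','u','v','w','x','y','z']
--
--     alfnovo =alfabeto[chave:] + alfabeto[:chave]
--
--     #Cria um dicionário
--     dicAlfabeto ={}
--     for k in range(len(alfabeto)):
--         dicAlfabeto[alfnovo[k]] = alfabeto[k]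
--     #Aqui a chave é oposta. Tenho alfnovo e quero o alfabeto original
--
--
--     msgOut =""
--
--     #Transforma tudo em minúsculo
--     msg2 = mensagem.lower()
--
--     for ch in msg2:
--         if ch in alfnovo:
--             msgOut += dicAlfabeto[ch]
--         else:
--             msgOut += ch
--
--     return(msgOut)
-- ===== SOURCE B (Python) =====
-- from math import ceil
--
-- def decifrarPoli(mensagem, tamBloco, chaves):
--     msg2 = mensagem.lower()
--     nblocos = ceil(len(mensagem) / tamBloco)
--     if nblocos <= 0:
--         return ""
--     nchaves = len(chaves)
--     alfabeto = 'abcdefghijklmnopqrstuvwxyz'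
--     # one decryption table per distinct reachable key, built once
--     maps = {}
--     for c in set(chaves[:min(nblocos, nchaves)]):
--         rot = alfabeto[c:] + alfabeto[:c]
--         maps[c] = {rot[k]: alfabeto[k] for k in range(26)}
--     out = []
--     for i, ch in enumerate(msg2):
--         tabela = maps[chaves[(i // tamBloco) % nchaves]]
--         out.append(tabela.get(ch, ch))
--     return ''.join(out)
-- ===== Notes on version B (the rewrite author's own statement) =====
-- stated objective: alternative
-- what changed: Instead of looping over blocks and rebuilding the rotated-alphabet dictionary for every block, B precomputes one decryption table per distinct reachable key and makes a single pass over the whole lowercased message, picking each character's table from its index via chaves[(i // tamBloco) % nchaves]; Pre_ excludes only the inputs where A raises ZeroDivisionError (tamBloco == 0, or empty chaves with at least one block).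
import Mathlib
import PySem

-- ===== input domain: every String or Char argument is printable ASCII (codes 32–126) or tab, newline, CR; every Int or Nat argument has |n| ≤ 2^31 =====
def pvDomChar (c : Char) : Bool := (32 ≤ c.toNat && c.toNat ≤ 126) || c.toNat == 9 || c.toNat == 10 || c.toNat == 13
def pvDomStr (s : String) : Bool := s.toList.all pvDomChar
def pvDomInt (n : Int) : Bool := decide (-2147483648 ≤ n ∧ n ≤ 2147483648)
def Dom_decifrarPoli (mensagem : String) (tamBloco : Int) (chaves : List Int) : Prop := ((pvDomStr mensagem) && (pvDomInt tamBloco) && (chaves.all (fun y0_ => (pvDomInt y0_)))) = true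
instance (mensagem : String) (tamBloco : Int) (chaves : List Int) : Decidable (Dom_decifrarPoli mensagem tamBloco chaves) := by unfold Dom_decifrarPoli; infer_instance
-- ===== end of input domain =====

-- B precomputes one decryption table per distinct reachable key and makes a single pass over
-- the message instead of rebuilding the rotated-alphabet dict for every block (objective: alternative).

-- ===== PORT A =====
-- strings are carried as List Char (PySem.Chars) and wrapped with String.ofList once at the end
def cesarAlfabeto : List Char :=
  ['a','b','c','d','e','f','g','h','i','j','k','l','m','n','o','p','q','r','s','t','u','v','w','x','y','z']

def decifrarCesar (mensagem : List Char) (chave : Int) : List Char :=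
  let alfabeto := cesarAlfabeto
  let alfnovo := PySem.List.slice alfabeto (some chave) none ++ PySem.List.slice alfabeto none (some chave)
  let dicAlfabeto := (PySem.List.pyRange 0 (PySem.List.len alfabeto) 1).foldl
      (fun d k => d.insert (PySem.List.pyGetD alfnovo k ' ') (PySem.List.pyGetD alfabeto k ' '))
      (PySem.Dict.mk [])
  let msg2 := PySem.Chars.lower mensagem
  msg2.foldl (fun acc ch =>
      if alfnovo.contains ch then acc ++ [dicAlfabeto.getD ch ' '] else acc ++ [ch]) []

def decifrarPoli (mensagem : String) (tamBloco : Int) (chaves : List Int) : String :=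
  let msg2 := PySem.Chars.lower mensagem.toList
  -- math.ceil(len(mensagem)/tamBloco) as exact ceiling division -((-len) // tamBloco)
  let nblocos := -(PySem.Int.floordiv (-(PySem.Str.len mensagem)) tamBloco)
  let nchaves := PySem.List.len chaves
  let msgOut := (PySem.List.pyRange 0 nblocos 1).foldl (fun acc i =>
      let ini := i * tamBloco
      let fim := (i + 1) * tamBloco
      let msg1 := PySem.List.slice msg2 (some ini) (some fim)
      let chv := PySem.List.pyGetD chaves (PySem.Int.mod i nchaves) 0
      acc ++ decifrarCesar msg1 chv) []
  String.ofList msgOut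

-- ===== PORT B =====
def bAlfabeto : List Char := "abcdefghijklmnopqrstuvwxyz".toList

-- the dict comprehension {rot[k]: alfabeto[k] for k in range(26)} for one key value c
def bTabela (c : Int) : PySem.Dict Char Char :=
  let rot := PySem.List.slice bAlfabeto (some c) none ++ PySem.List.slice bAlfabeto none (some c)
  (List.range 26).foldl (fun d k => d.insert (rot.getD k ' ') (bAlfabeto.getD k ' ')) (PySem.Dict.mk [])

def decifrarPoli_alt (mensagem : String) (tamBloco : Int) (chaves : List Int) : String :=
  let msg2 := PySem.Chars.lower mensagem.toList
  let nblocos := -(PySem.Int.floordiv (-(PySem.Str.len mensagem)) tamBloco)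
  if nblocos ≤ 0 then "" else
  let nchaves := PySem.List.len chaves
  let maps : PySem.Dict Int (PySem.Dict Char Char) :=
    (PySem.Set.ofList (PySem.List.slice chaves none (some (min nblocos nchaves)))).foldl
      (fun m c => m.insert c (bTabela c)) (PySem.Dict.mk [])
  String.ofList ((PySem.List.enumerate msg2).map (fun p =>
    let tabela := maps.getD (PySem.List.pyGetD chaves
        (PySem.Int.mod (PySem.Int.floordiv p.1 tamBloco) nchaves) 0) (PySem.Dict.mk [])
    tabela.getD p.2 p.2))

-- ===== PRECONDITION & SPEC =====
-- Pre_ excludes exactly the inputs on which A raises ZeroDivisionError: tamBloco == 0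
-- (ceil division), or an empty key list while at least one block exists (i % 0).
def Pre_decifrarPoli (mensagem : String) (tamBloco : Int) (chaves : List Int) : Prop :=
  tamBloco ≠ 0 ∧ (chaves ≠ [] ∨ mensagem = "" ∨ tamBloco < 0)
instance (mensagem : String) (tamBloco : Int) (chaves : List Int) : Decidable (Pre_decifrarPoli mensagem tamBloco chaves) := by unfold Pre_decifrarPoli; infer_instance

def pvWitness_decifrarPoli : String × Int × List Int := ("Abc, xyz!", 2, [1, 3])

def Spec_decifrarPoli (mensagem : String) (tamBloco : Int) (chaves : List Int) (out : String) : Prop := out = decifrarPoli_alt mensagem tamBloco chaves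
instance (mensagem : String) (tamBloco : Int) (chaves : List Int) (out : String) : Decidable (Spec_decifrarPoli mensagem tamBloco chaves out) := by unfold Spec_decifrarPoli; infer_instance

-- ===== CLAIM (what is proved, stated in full; the proofs are below) =====
def Claim_equal_decifrarPoli : Prop := ∀ (mensagem : String) (tamBloco : Int) (chaves : List Int), Dom_decifrarPoli mensagem tamBloco chaves → Pre_decifrarPoli mensagem tamBloco chaves → Spec_decifrarPoli mensagem tamBloco chaves (decifrarPoli mensagem tamBloco chaves)

-- ===== LEMMAS AND PROOFS =====

lemma pv_map_getD_range {α : Type} (l : List α) (d : α) :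
    (List.range l.length).map (fun i => l.getD i d) = l := by
  apply List.ext_getElem
  · simp
  · intro i h1 h2
    simp [List.getD_eq_getElem?_getD, List.getElem?_eq_getElem h2]

lemma pvB_length : bAlfabeto.length = 26 := by decide

lemma pv_rot_eq (c : Int) :
    PySem.List.slice bAlfabeto (some c) none ++ PySem.List.slice bAlfabeto none (some c)
      = bAlfabeto.drop (PySem.List.clampIdx 26 c) ++ bAlfabeto.take (PySem.List.clampIdx 26 c) := by
  rw [PySem.List.slice_some_none]
  simp [PySem.List.slice, pvB_length]

lemma pv_rot_perm (c : Int) :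
    (PySem.List.slice bAlfabeto (some c) none ++ PySem.List.slice bAlfabeto none (some c)).Perm bAlfabeto := by
  rw [pv_rot_eq]
  calc (bAlfabeto.drop (PySem.List.clampIdx 26 c) ++ bAlfabeto.take (PySem.List.clampIdx 26 c)).Perm
        (bAlfabeto.take (PySem.List.clampIdx 26 c) ++ bAlfabeto.drop (PySem.List.clampIdx 26 c)) := List.perm_append_comm
    _ = bAlfabeto := List.take_append_drop _ _

lemma pv_rot_length (c : Int) :
    (PySem.List.slice bAlfabeto (some c) none ++ PySem.List.slice bAlfabeto none (some c)).length = 26 := by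
  rw [(pv_rot_perm c).length_eq, pvB_length]

lemma pv_dic_eq_tabela (c : Int) :
    (PySem.List.pyRange 0 (PySem.List.len cesarAlfabeto) 1).foldl
      (fun d k => d.insert
        (PySem.List.pyGetD (PySem.List.slice cesarAlfabeto (some c) none ++ PySem.List.slice cesarAlfabeto none (some c)) k ' ')
        (PySem.List.pyGetD cesarAlfabeto k ' '))
      (PySem.Dict.mk []) = bTabela c := by
  have hab : cesarAlfabeto = bAlfabeto := by decide
  have h26 : PySem.List.len cesarAlfabeto = (26:Int) := by decide
  rw [h26, hab, PySem.List.pyRange_one]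
  simp only [show ((26:Int) - 0).toNat = 26 from by decide, List.foldl_map]
  unfold bTabela
  congr 1
  funext d k
  simp

lemma pv_tabela_get?_none_iff (c : Int) (ch : Char) :
    (bTabela c).get? ch = none ↔
      ¬ ch ∈ (PySem.List.slice bAlfabeto (some c) none ++ PySem.List.slice bAlfabeto none (some c)) := by
  unfold bTabela
  rw [PySem.Dict.get?_eq_none_iff_not_mem_keys]
  rw [PySem.Dict.keys_foldl_insert_key]
  have hk : (PySem.Dict.mk ([] : List (Char × Char))).keys = [] := rfl
  rw [hk]
  have hrot : (List.range 26).map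
      (fun k => (PySem.List.slice bAlfabeto (some c) none ++ PySem.List.slice bAlfabeto none (some c)).getD k ' ')
      = PySem.List.slice bAlfabeto (some c) none ++ PySem.List.slice bAlfabeto none (some c) := by
    conv_lhs => rw [show 26 = (PySem.List.slice bAlfabeto (some c) none ++ PySem.List.slice bAlfabeto none (some c)).length from (pv_rot_length c).symm]
    exact pv_map_getD_range _ _
  rw [hrot, not_iff_not]
  rw [PySem.Set.mem_update]
  simp

lemma pv_lowerChar_idem (ch : Char) :
    PySem.Chars.lowerChar (PySem.Chars.lowerChar ch) = PySem.Chars.lowerChar ch := by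
  simp only [PySem.Chars.lowerChar, PySem.Chars.isupper]
  by_cases h : ('A' ≤ ch ∧ ch ≤ 'Z')
  · have hn : ch.toNat ≤ 90 := by
      have := h.2
      rw [Char.le_def] at this
      exact this
    have hn2 : 65 ≤ ch.toNat := by
      have := h.1
      rw [Char.le_def] at this
      exact this
    have hv : (ch.toNat + 32).isValidChar := by left; omega
    have ht : (Char.ofNat (ch.toNat + 32)).toNat = ch.toNat + 32 := by
      rw [Char.toNat_ofNat, if_pos hv]
    simp only [h, decide_true, Bool.and_self, if_true]
    have hz : ¬ (Char.ofNat (ch.toNat + 32) ≤ 'Z') := by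
      rw [Char.le_def]
      show ¬ ((Char.ofNat (ch.toNat + 32)).toNat ≤ 90)
      omega
    simp [hz]
  · have hb : ¬ (decide ('A' ≤ ch) && decide (ch ≤ 'Z')) = true := by
      simpa [Decidable.not_and_iff_not_or_not] using h
    simp only [Bool.not_eq_true] at hb
    simp [hb]

lemma pv_cesar_eq_map (ms : List Char) (c : Int)
    (hms : ∀ ch ∈ ms, PySem.Chars.lowerChar ch = ch) :
    decifrarCesar ms c = ms.map (fun ch => (bTabela c).getD ch ch) := by
  unfold decifrarCesar
  have hab : cesarAlfabeto = bAlfabeto := by decide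
  simp only [pv_dic_eq_tabela]
  simp only [hab]
  have hlow : PySem.Chars.lower ms = ms := by
    unfold PySem.Chars.lower
    rw [List.map_congr_left hms]
    exact List.map_id' ms
  rw [hlow]
  have hstep : (fun (acc : List Char) ch =>
      if (PySem.List.slice bAlfabeto (some c) none ++ PySem.List.slice bAlfabeto none (some c)).contains ch
      then acc ++ [(bTabela c).getD ch ' '] else acc ++ [ch])
      = fun acc ch => acc ++ [if (PySem.List.slice bAlfabeto (some c) none ++ PySem.List.slice bAlfabeto none (some c)).contains ch
          then (bTabela c).getD ch ' ' else ch] := by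
    funext acc ch
    split <;> rfl
  rw [hstep, PySem.List.foldl_append_singleton_eq_map]
  rw [List.nil_append]
  apply List.map_congr_left
  intro ch _
  by_cases hmem : ch ∈ (PySem.List.slice bAlfabeto (some c) none ++ PySem.List.slice bAlfabeto none (some c))
  · have hcont : (PySem.List.slice bAlfabeto (some c) none ++ PySem.List.slice bAlfabeto none (some c)).contains ch = true :=
      List.contains_iff_mem.mpr hmem
    rw [if_pos hcont]
    have hsome : (bTabela c).get? ch ≠ none := by
      intro hno
      exact ((pv_tabela_get?_none_iff c ch).mp hno) hmem
    obtain ⟨v, hv⟩ := Option.ne_none_iff_exists'.mp hsome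
    simp [PySem.Dict.getD, hv]
  · have hcont : (PySem.List.slice bAlfabeto (some c) none ++ PySem.List.slice bAlfabeto none (some c)).contains ch = false := by
      simpa using hmem
    rw [if_neg (by simp only [hcont]; simp)]
    have hnone : (bTabela c).get? ch = none := (pv_tabela_get?_none_iff c ch).mpr hmem
    simp [PySem.Dict.getD, hnone]

lemma pv_find_self (l : List Int) (key : Int) (h : key ∈ l) :
    l.find? (fun c => c == key) = some key := by
  induction l with
  | nil => simp at h
  | cons a t ih =>
    rw [List.find?_cons]
    by_cases ha : a = key
    · subst ha; simp
    · have hf : (a == key) = false := by simp [ha]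
      rw [hf]
      rcases List.mem_cons.mp h with h1 | h2
      · exact absurd h1.symm ha
      · exact ih h2

lemma pv_maps_getD (chaves : List Int) (key : Int) (h : key ∈ chaves) :
    ((PySem.Set.ofList chaves).foldl (fun m c => m.insert c (bTabela c)) (PySem.Dict.mk [])).getD
        key (PySem.Dict.mk []) = bTabela key := by
  have hitems : ((PySem.Set.ofList chaves).foldl (fun m c => m.insert c (bTabela c))
      (PySem.Dict.mk ([] : List (Int × PySem.Dict Char Char)))).items
      = (PySem.Set.ofList chaves).map (fun c => (c, bTabela c)) := by
    have := PySem.Dict.items_foldl_insert_fresh (PySem.Set.ofList chaves)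
      (fun c => c) (fun c => bTabela c) (PySem.Dict.mk [])
      (by intro a _; rfl)
      (by simp [PySem.Set.nodup_ofList])
    simpa using this
  unfold PySem.Dict.getD PySem.Dict.get?
  rw [hitems, List.find?_map]
  have hfind : (PySem.Set.ofList chaves).find?
      ((fun p => p.1 == key) ∘ fun c => (c, bTabela c)) = some key := by
    have hmem : key ∈ PySem.Set.ofList chaves := (PySem.Set.mem_ofList chaves key).mpr h
    simpa using pv_find_self _ key hmem
  rw [hfind]
  simp

lemma pv_enum_map_const {h : Int → Char → Char} {h0 : Char → Char} :
    ∀ (l : List Char) (s : Int),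
    (∀ j : Nat, j < l.length → ∀ x, h (s + (j : Int)) x = h0 x) →
    (PySem.List.enumerate l s).map (fun p => h p.1 p.2) = l.map h0 := by
  intro l
  induction l with
  | nil => intro s _; simp [PySem.List.enumerate_nil]
  | cons a t ih =>
    intro s hc
    rw [PySem.List.enumerate_cons]
    simp only [List.map_cons]
    congr 1
    · simpa using hc 0 (by simp) a
    · apply ih
      intro j hj x
      have := hc (j+1) (by simpa using Nat.succ_lt_succ hj) x
      rw [← this]
      congr 1
      push_cast
      ring

lemma pv_enumerate_bounds : ∀ (l : List Char) (s : Int) (p : Int × Char),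
    p ∈ PySem.List.enumerate l s → s ≤ p.1 ∧ p.1 < s + l.length := by
  intro l
  induction l with
  | nil => intro s p hp; rw [PySem.List.enumerate_nil] at hp; simp at hp
  | cons a t ih =>
    intro s p hp
    rw [PySem.List.enumerate_cons] at hp
    rcases List.mem_cons.mp hp with h | h
    · subst h; simp
    · have := ih (s + 1) p h
      simp only [List.length_cons]
      push_cast
      omega

lemma pv_blocks (F : Int → Char → Char) (m : Nat) (hm : 0 < m) :
    ∀ (b : Nat) (l : List Char) (off : Nat), l.length ≤ b * m →
    (List.range b).flatMap (fun k => ((l.drop (k * m)).take m).map (fun ch => F ((off : Int) + (k : Int)) ch))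
      = (PySem.List.enumerate l ((off * m : Nat) : Int)).map
          (fun p => F (PySem.Int.floordiv p.1 (m : Int)) p.2) := by
  intro b
  induction b with
  | zero =>
    intro l off hl
    have : l = [] := List.eq_nil_of_length_eq_zero (by omega)
    subst this
    simp [PySem.List.enumerate_nil]
  | succ b ih =>
    intro l off hl
    have henum : ∀ (l1 : List Char), l1.length ≤ m →
        (PySem.List.enumerate l1 ((off * m : Nat) : Int)).map
            (fun p => F (PySem.Int.floordiv p.1 (m : Int)) p.2)
          = l1.map (fun ch => F ((off : Int)) ch) := by
      intro l1 hl1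
      refine pv_enum_map_const (h := fun i x => F (PySem.Int.floordiv i (m : Int)) x)
        (h0 := fun x => F ((off : Int)) x) l1 ((off * m : Nat) : Int) ?_
      intro j hj x
      have hdiv : PySem.Int.floordiv (((off * m : Nat) : Int) + (j : Int)) (m : Int) = (off : Int) := by
        have h1 : (((off * m : Nat) : Int) + (j : Int)) = ((off * m + j : Nat) : Int) := by push_cast; ring
        rw [h1, PySem.Int.floordiv_natCast]
        have h2 : (off * m + j) / m = off := by
          rw [Nat.mul_comm off m, Nat.mul_add_div hm, Nat.div_eq_of_lt (by omega)]
          omega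
        rw [h2]
      show F (PySem.Int.floordiv (((off * m : Nat) : Int) + (j : Int)) (m : Int)) x = F ((off : Int)) x
      rw [hdiv]
    rw [List.range_succ_eq_map, List.flatMap_cons, List.flatMap_map]
    conv_rhs => rw [show l = l.take m ++ l.drop m from (List.take_append_drop m l).symm]
    rw [PySem.List.enumerate_append, List.map_append]
    congr 1
    · simp only [Nat.zero_mul, List.drop_zero, Nat.cast_zero, add_zero]
      exact (henum (l.take m) (by simp)).symm
    · by_cases hml : m ≤ l.length
      · have hlen_take : (l.take m).length = m := by simp [hml]
        have hfun : (fun k => ((l.drop (Nat.succ k * m)).take m).map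
              (fun ch => F ((off : Int) + ((Nat.succ k : Nat) : Int)) ch))
            = (fun k : Nat => (((l.drop m).drop (k * m)).take m).map
              (fun ch => F (((off + 1 : Nat) : Int) + (k : Int)) ch)) := by
          funext k
          rw [List.drop_drop]
          have h1 : m + k * m = Nat.succ k * m := by rw [Nat.succ_mul, Nat.add_comm]
          have h2 : ((off : Int) + ((Nat.succ k : Nat) : Int)) = (((off + 1 : Nat) : Int) + (k : Int)) := by
            push_cast; ring
          rw [h1, h2]
        rw [hfun, ih (l.drop m) (off + 1)
          (by rw [List.length_drop]; exact Nat.sub_le_iff_le_add.mpr (by rw [Nat.succ_mul] at hl; exact hl))]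
        rw [hlen_take]
        congr 2
        push_cast
        ring
      · have hdrop : l.drop m = [] := List.drop_eq_nil_of_le (by omega)
        rw [hdrop]
        simp only [PySem.List.enumerate_nil, List.map_nil]
        simp
        intro x _
        right
        have h1 : m ≤ (x + 1) * m := Nat.le_mul_of_pos_left m (by omega)
        omega

-- ===== VERDICT (by name: the statement is the Claim_ definition above) =====
set_option maxHeartbeats 1000000 in
theorem decifrarPoli_spec : Claim_equal_decifrarPoli := by
  intro mensagem tamBloco chaves _hdom hpre
  obtain ⟨ht0, hp⟩ := hpre
  show decifrarPoli mensagem tamBloco chaves = decifrarPoli_alt mensagem tamBloco chaves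
  simp only [decifrarPoli, decifrarPoli_alt]
  set L := PySem.Chars.lower mensagem.toList with hLdef
  set n := -(PySem.Int.floordiv (-(PySem.Str.len mensagem)) tamBloco) with hndef
  by_cases hn : n ≤ 0
  · rw [if_pos hn, PySem.List.pyRange_one_eq_nil hn]
    rfl
  · rw [if_neg hn]
    rw [not_le] at hn
    have hpos : 0 < tamBloco := by
      rcases lt_or_gt_of_ne ht0 with hneg | hpos
      · exfalso
        have hq := PySem.Int.floordiv_mul_add_mod (-(PySem.Str.len mensagem)) tamBloco
        have hb := PySem.Int.mod_neg_bounds (a := -(PySem.Str.len mensagem)) hneg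
        have hlen0 : (0:Int) ≤ PySem.Str.len mensagem := by
          rw [show PySem.Str.len mensagem = ((mensagem.toList.length : Nat) : Int) from rfl]
          positivity
        rw [hndef] at hn
        nlinarith [hn, hq, hb.1, hb.2, hlen0]
      · exact hpos
    have hmt : tamBloco = ((tamBloco.toNat : Nat) : Int) := (Int.toNat_of_nonneg hpos.le).symm
    set m := tamBloco.toNat with hmdef
    have hm : 0 < m := by omega
    have hceil : ((n - 1) * tamBloco < PySem.Str.len mensagem ∧ PySem.Str.len mensagem ≤ n * tamBloco) :=
      (PySem.Int.neg_floordiv_neg_eq_iff_of_pos hpos).mp hndef.symm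
    have hlenI : PySem.Str.len mensagem = ((mensagem.toList.length : Nat) : Int) := rfl
    have hLlen : L.length = mensagem.toList.length := by
      rw [hLdef]; simp [PySem.Chars.lower]
    have hch : chaves ≠ [] := by
      rcases hp with h | h | h
      · exact h
      · exfalso
        rw [h] at hlenI
        have hz : PySem.Str.len "" = (0 : Int) := rfl
        rw [h] at hceil
        rw [hz] at hceil
        nlinarith [hceil.1, hn, hpos]
      · omega
    have hK : 0 < chaves.length := List.length_pos_iff.mpr hch
    have hKI : (0:Int) < PySem.List.len chaves := by
      rw [PySem.List.len_eq]; exact_mod_cast hK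
    have hkey : ∀ i : Int, PySem.List.pyGetD chaves (PySem.Int.mod i (PySem.List.len chaves)) 0 ∈ chaves := by
      intro i
      apply PySem.List.pyGetD_mem
      constructor
      · have := PySem.Int.mod_nonneg i hKI
        rw [PySem.List.len_eq] at *
        omega
      · have := PySem.Int.mod_lt i hKI
        rw [PySem.List.len_eq] at *
        omega
    rw [PySem.List.foldl_append_eq_flatMap, List.nil_append]
    congr 1
    rw [PySem.List.pyRange_one 0 n, List.flatMap_map]
    simp only [zero_add, sub_zero]
    have hms : ∀ ch ∈ L, PySem.Chars.lowerChar ch = ch := by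
      intro ch hch2
      rw [hLdef] at hch2
      simp only [PySem.Chars.lower] at hch2
      obtain ⟨y, _, rfl⟩ := List.mem_map.mp hch2
      exact pv_lowerChar_idem y
    have hlenLe : L.length ≤ n.toNat * m := by
      have h2 := hceil.2
      rw [hmt, hlenI, ← hLlen] at h2
      have h3 : (L.length : Int) ≤ ((n.toNat * m : Nat) : Int) := by
        push_cast
        rw [Int.toNat_of_nonneg hn.le]
        exact h2
      exact_mod_cast h3
    have hbody : (fun k : Nat => decifrarCesar
          (PySem.List.slice L (some ((k : Int) * tamBloco)) (some (((k : Int) + 1) * tamBloco)))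
          (PySem.List.pyGetD chaves (PySem.Int.mod (k : Int) (PySem.List.len chaves)) 0))
        = fun k : Nat => ((L.drop (k * m)).take m).map
            (fun ch => (fun (i : Int) (c : Char) =>
              (bTabela (PySem.List.pyGetD chaves (PySem.Int.mod i (PySem.List.len chaves)) 0)).getD c c)
              (((0 : Nat) : Int) + (k : Int)) ch) := by
      funext k
      have hsl : PySem.List.slice L (some ((k : Int) * tamBloco)) (some (((k : Int) + 1) * tamBloco))
          = (L.drop (k * m)).take m := by
        rw [hmt]
        have e1 : ((k : Int) * ((m : Nat) : Int)) = ((k * m : Nat) : Int) := by push_cast; ring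
        have e2 : (((k : Int) + 1) * ((m : Nat) : Int)) = ((k * m + m : Nat) : Int) := by push_cast; ring
        rw [e1, e2, PySem.List.slice_natCast]
        congr 1
        omega
      rw [hsl]
      rw [pv_cesar_eq_map _ _ (fun ch hch2 =>
        hms ch (List.mem_of_mem_drop (List.mem_of_mem_take hch2)))]
      apply List.map_congr_left
      intro ch _
      have harg : (((0 : Nat) : Int) + (k : Int)) = (k : Int) := by push_cast; ring
      rw [harg]
    rw [hbody]
    rw [pv_blocks (fun (i : Int) (c : Char) =>
        (bTabela (PySem.List.pyGetD chaves (PySem.Int.mod i (PySem.List.len chaves)) 0)).getD c c)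
      m hm n.toNat L 0 hlenLe]
    have h0 : ((0 * m : Nat) : Int) = (0 : Int) := by simp
    rw [h0]
    apply List.map_congr_left
    intro p hpmem
    have hpb := pv_enumerate_bounds L 0 p hpmem
    rw [← hmt]
    -- the key index reached at character p.1 lies below min nblocos nchaves
    have hd0 : 0 ≤ PySem.Int.floordiv p.1 tamBloco := by
      rw [PySem.Int.floordiv_eq_ediv_of_pos hpos]
      exact Int.ediv_nonneg (by omega) hpos.le
    have hdn : PySem.Int.floordiv p.1 tamBloco < n := by
      rw [PySem.Int.floordiv_lt_iff_lt_mul hpos]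
      have hplen : p.1 < (L.length : Int) := by
        have := hpb.2
        omega
      have h2 := hceil.2
      rw [hlenI, ← hLlen] at h2
      exact lt_of_lt_of_le hplen h2
    have hq0 : 0 ≤ PySem.Int.mod (PySem.Int.floordiv p.1 tamBloco) (PySem.List.len chaves) :=
      PySem.Int.mod_nonneg _ hKI
    have hqK : PySem.Int.mod (PySem.Int.floordiv p.1 tamBloco) (PySem.List.len chaves) < PySem.List.len chaves :=
      PySem.Int.mod_lt _ hKI
    have hqmin : PySem.Int.mod (PySem.Int.floordiv p.1 tamBloco) (PySem.List.len chaves) < min n (PySem.List.len chaves) := by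
      by_cases hKn : PySem.List.len chaves ≤ n
      · omega
      · have : PySem.Int.mod (PySem.Int.floordiv p.1 tamBloco) (PySem.List.len chaves)
            = PySem.Int.floordiv p.1 tamBloco := by
          rw [PySem.Int.mod_eq_emod_of_pos hKI]
          exact Int.emod_eq_of_lt hd0 (by omega)
        -- here n < len chaves
        omega
    have hmem : PySem.List.pyGetD chaves (PySem.Int.mod (PySem.Int.floordiv p.1 tamBloco) (PySem.List.len chaves)) 0
        ∈ PySem.List.slice chaves none (some (min n (PySem.List.len chaves))) := by
      rw [PySem.List.slice_to (xs := chaves) (b := min n (PySem.List.len chaves)) (by omega)]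
      rw [PySem.List.pyGetD_eq_getElem chaves 0 hq0 (by rw [PySem.List.len_eq] at hqK; exact hqK)]
      have hlt : (PySem.Int.mod (PySem.Int.floordiv p.1 tamBloco) (PySem.List.len chaves)).toNat
          < (chaves.take (min n (PySem.List.len chaves)).toNat).length := by
        rw [List.length_take, PySem.List.len_eq] at *
        omega
      rw [← List.getElem_take (j := (min n (PySem.List.len chaves)).toNat) (h := hlt)]
      exact List.getElem_mem _
    rw [pv_maps_getD _ _ hmem]
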